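-- pv_equiv track=rewrite | github.com/python/cpython | Tools/unicode/packtab/packTab/__init__.py | _aligned_base_for_live_range
-- ===== SOURCE A (Python) =====
-- def _aligned_base_for_live_range(data, default):
--     """Return the aligned base for the smallest dyadic interval covering live data.
--
--     The live range is the span from the first non-default value to the last
--     non-default value. The returned base is the start of the smallest power-of-two
--     aligned interval containing that span. If all values equal the default, the
--     base is zero.
--     """
--     first = next((i for i, v in enumerate(data) if v != default), None)
--     if first is None:
--         return 0
--
--     last = len(data) - 1 - next(i for i, v in enumerate(reversed(data)) if v != default)
--     differing_bits = first ^ last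
--     if differing_bits == 0:
--         return first
--
--     mask = (1 << differing_bits.bit_length()) - 1
--     return first & ~mask
-- ===== SOURCE B (Python) =====
-- def _aligned_base_for_live_range(data, default):
--     """Collect the live indices, then grow a power-of-two block by doubling
--     until a single aligned block covers both ends of the live span; no
--     xor/bit_length/mask arithmetic."""
--     live = [i for i, v in enumerate(data) if v != default]
--     if not live:
--         return 0
--     first, last = live[0], live[-1]
--     block = 1
--     while first // block != last // block:
--         block *= 2
--     return first // block * block
-- ===== Notes on version B (the rewrite author's own statement) =====
-- stated objective: alternative
-- what changed: B drops the xor/bit_length/mask bit arithmetic and the two boundary scans: it builds the list of live indices with one filtered enumeration and then grows a power-of-two block by doubling until a single aligned block contains both ends, returning first // block * block.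
import Mathlib
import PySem

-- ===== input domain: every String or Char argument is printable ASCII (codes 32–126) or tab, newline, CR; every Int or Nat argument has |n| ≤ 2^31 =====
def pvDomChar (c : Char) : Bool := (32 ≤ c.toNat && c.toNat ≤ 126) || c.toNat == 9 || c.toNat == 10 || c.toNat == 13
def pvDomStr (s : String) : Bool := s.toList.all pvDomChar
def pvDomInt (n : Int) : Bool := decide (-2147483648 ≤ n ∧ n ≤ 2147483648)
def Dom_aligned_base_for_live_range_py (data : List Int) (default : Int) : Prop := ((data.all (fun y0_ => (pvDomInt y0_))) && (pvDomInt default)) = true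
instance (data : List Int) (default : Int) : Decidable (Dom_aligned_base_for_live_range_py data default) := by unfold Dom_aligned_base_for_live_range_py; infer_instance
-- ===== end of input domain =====

-- B replaces A's xor/bit_length/mask arithmetic and two boundary scans by a filtered
-- index list plus a doubling loop that grows a power-of-two block until one aligned
-- block covers the live span; objective: alternative algorithm, same result.

-- ===== PORT A =====
-- first = next((i for i, v in enumerate(data) if v != default), None); then
-- last = len(data) - 1 - next(i for i, v in enumerate(reversed(data)) if v != default).
-- The inner next has no default: when `first` exists it cannot raise, so the
-- `.getD 0` arm below is unreachable on every input reaching it.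
def aligned_base_for_live_range_py (data : List Int) (default : Int) : Int :=
  match (PySem.List.enumerate data).find? (fun p => p.2 != default) with
  | none => 0
  | some (first, _) =>
    let last : Int := (data.length : Int) - 1 -
      ((((PySem.List.enumerate data.reverse).find? (fun p => p.2 != default)).map Prod.fst).getD 0)
    let differing_bits : Int := PySem.Int.bxor first last
    if differing_bits == 0 then first
    else
      let mask : Int := (1 <<< PySem.Int.bitLength differing_bits) - 1
      PySem.Int.band first (Int.not mask)

-- ===== PORT B =====
-- while first // block != last // block: block *= 2; then first // block * block.
-- Structural recursion on a fuel counter; the caller passes fuel last.toNat + 1,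
-- which the proofs below show is never exhausted; the fuel-0 arm returns the
-- loop's exit expression.
def pvAlignLoop (first last : Int) : Nat → Int → Int
  | 0, block => PySem.Int.floordiv first block * block
  | Nat.succ n, block =>
    if PySem.Int.floordiv first block == PySem.Int.floordiv last block then
      PySem.Int.floordiv first block * block
    else pvAlignLoop first last n (block * 2)

-- live = [i for i, v in enumerate(data) if v != default]; if not live: return 0;
-- first, last = live[0], live[-1]; doubling loop.
def aligned_base_for_live_range_py_alt (data : List Int) (default : Int) : Int :=
  let live := ((PySem.List.enumerate data).filter (fun p => p.2 != default)).map Prod.fst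
  match live with
  | [] => 0
  | f :: rest =>
    let last := (f :: rest).getLast (List.cons_ne_nil f rest)
    pvAlignLoop f last (last.toNat + 1) 1

-- ===== PRECONDITION & SPEC =====
def Spec_aligned_base_for_live_range_py (data : List Int) (default : Int) (out : Int) : Prop := out = aligned_base_for_live_range_py_alt data default
instance (data : List Int) (default : Int) (out : Int) : Decidable (Spec_aligned_base_for_live_range_py data default out) := by unfold Spec_aligned_base_for_live_range_py; infer_instance

-- ===== CLAIM (what is proved, stated in full; the proofs are below) =====
def Claim_equal_aligned_base_for_live_range_py : Prop := ∀ (data : List Int) (default : Int), Dom_aligned_base_for_live_range_py data default → Spec_aligned_base_for_live_range_py data default (aligned_base_for_live_range_py data default)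

-- ===== LEMMAS AND PROOFS =====

theorem pv_not_eq (x : Int) : Int.not x = -x - 1 := by
  rcases x with n | n <;> simp [Int.not, Int.negSucc_eq] <;> omega

-- the dyadic-block criterion: two indices share the 2^k-aligned block iff their xor < 2^k
theorem pv_div_eq_iff_xor_lt (k a b : Nat) : a / 2 ^ k = b / 2 ^ k ↔ a ^^^ b < 2 ^ k := by
  induction k generalizing a b with
  | zero => simpa [Nat.lt_one_iff] using (Nat.xor_eq_zero_iff (n := a) (m := b)).symm
  | succ k ih =>
    have h1 : a / 2 ^ (k + 1) = (a / 2) / 2 ^ k := by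
      rw [Nat.div_div_eq_div_mul, pow_succ, mul_comm (2 ^ k) 2, mul_comm 2 (2 ^ k)]
    have h2 : b / 2 ^ (k + 1) = (b / 2) / 2 ^ k := by
      rw [Nat.div_div_eq_div_mul, pow_succ, mul_comm (2 ^ k) 2, mul_comm 2 (2 ^ k)]
    rw [h1, h2, ih]
    rw [← Nat.xor_div_two]
    constructor
    · intro h
      have := Nat.lt_of_div_lt_div (a := a ^^^ b) (b := 2 ^ (k+1)) (c := 2)
      omega
    · intro h
      have : (a ^^^ b) / 2 < 2 ^ (k + 1) / 2 + 1 := by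
        exact Nat.lt_succ_of_le (Nat.div_le_div_right (Nat.le_of_lt_succ (Nat.lt_succ_of_lt h)))
      have hp : 2 ^ (k + 1) / 2 = 2 ^ k := by
        rw [pow_succ]; omega
      omega

-- bitLength is the least k with x < 2^k
theorem pv_bitLength_le (x k : Nat) (hx : x ≠ 0) (h : x < 2 ^ k) :
    PySem.Int.bitLength (x : Int) ≤ k := by
  by_contra hc
  have h1 := PySem.Int.two_pow_bitLength_le (x : Int) (by exact_mod_cast hx)
  have h2 : 2 ^ k ≤ 2 ^ (PySem.Int.bitLength (x : Int) - 1) :=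
    Nat.pow_le_pow_right (by omega) (by omega)
  simp only [Int.natAbs_natCast] at h1
  omega

-- the loop, run on block 2^j with enough fuel, lands exactly on block 2^B
theorem pv_loop_run (a b : Nat) (hne : a ≠ b) (fuel j : Nat)
    (hj : j ≤ PySem.Int.bitLength ((a ^^^ b : Nat) : Int))
    (hf : PySem.Int.bitLength ((a ^^^ b : Nat) : Int) ≤ j + fuel) :
    pvAlignLoop (a : Int) (b : Int) fuel ((2 ^ j : Nat) : Int)
      = ((a / 2 ^ PySem.Int.bitLength ((a ^^^ b : Nat) : Int)
          * 2 ^ PySem.Int.bitLength ((a ^^^ b : Nat) : Int) : Nat) : Int) := by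
  induction fuel generalizing j with
  | zero =>
    have hjB : j = PySem.Int.bitLength ((a ^^^ b : Nat) : Int) := by omega
    subst hjB
    simp only [pvAlignLoop, PySem.Int.floordiv_natCast]
    push_cast
    ring
  | succ n ih =>
    by_cases hjB : j = PySem.Int.bitLength ((a ^^^ b : Nat) : Int)
    · subst hjB
      have hlt : a ^^^ b < 2 ^ PySem.Int.bitLength ((a ^^^ b : Nat) : Int) := by
        have := PySem.Int.lt_two_pow_bitLength ((a ^^^ b : Nat) : Int)
        simpa using this
      have heq : a / 2 ^ PySem.Int.bitLength ((a ^^^ b : Nat) : Int)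
          = b / 2 ^ PySem.Int.bitLength ((a ^^^ b : Nat) : Int) :=
        (pv_div_eq_iff_xor_lt _ a b).mpr hlt
      simp only [pvAlignLoop, PySem.Int.floordiv_natCast]
      rw [if_pos (beq_iff_eq.mpr (by exact_mod_cast heq))]
      push_cast
      ring
    · have hjlt : j < PySem.Int.bitLength ((a ^^^ b : Nat) : Int) := by omega
      have hxne : a ^^^ b ≠ 0 := fun h => hne (Nat.xor_eq_zero_iff.mp h)
      have hge : 2 ^ j ≤ a ^^^ b := by
        have h1 := PySem.Int.two_pow_bitLength_le ((a ^^^ b : Nat) : Int)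
          (by exact_mod_cast hxne)
        simp only [Int.natAbs_natCast] at h1
        have h2 : (2:Nat) ^ j ≤ 2 ^ (PySem.Int.bitLength ((a ^^^ b : Nat) : Int) - 1) :=
          Nat.pow_le_pow_right (by omega) (by omega)
        omega
      have hneq : a / 2 ^ j ≠ b / 2 ^ j := by
        intro h
        have := (pv_div_eq_iff_xor_lt j a b).mp h
        omega
      have hstep : ((2 ^ j : Nat) : Int) * 2 = ((2 ^ (j + 1) : Nat) : Int) := by
        push_cast; ring
      simp only [pvAlignLoop, PySem.Int.floordiv_natCast]
      rw [if_neg (fun h => hneq (by exact_mod_cast beq_iff_eq.mp h)), hstep]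
      exact ih (j + 1) (by omega) (by omega)

-- degenerate live span: one index
theorem pv_loop_self (a : Int) (fuel : Nat) : pvAlignLoop a a fuel 1 = a := by
  have h1 : PySem.Int.floordiv a 1 = a := by
    rw [PySem.Int.floordiv_eq_ediv_of_pos (by omega)]; simp
  cases fuel <;> simp [pvAlignLoop, h1]

-- A's masking step computes the aligned base as a Nat division
theorem pv_band_not_mask (a B : Nat) :
    PySem.Int.band (a : Int) (Int.not (((1:Int) <<< B) - 1)) = ((a / 2 ^ B * 2 ^ B : Nat) : Int) := by
  have h1 : (1:Nat) ≤ 2 ^ B := Nat.one_le_two_pow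
  have hmask : ((1:Int) <<< B) - 1 = ((2 ^ B - 1 : Nat) : Int) := by
    rw [Int.shiftLeft_eq]
    push_cast [h1]
    ring
  rw [hmask, pv_not_eq]
  have h2 : ¬ (0:Int) ≤ -((2 ^ B - 1 : Nat) : Int) - 1 := by
    have : (0:Int) ≤ ((2 ^ B - 1 : Nat) : Int) := Int.natCast_nonneg _
    omega
  unfold PySem.Int.band
  rw [if_pos (Int.natCast_nonneg a), if_neg h2]
  have h3 : (-(-((2 ^ B - 1 : Nat) : Int) - 1) - 1) = ((2 ^ B - 1 : Nat) : Int) := by ring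
  rw [h3]
  simp only [Int.toNat_natCast, Nat.and_two_pow_sub_one_eq_mod]
  have h4 : a - a % 2 ^ B = a / 2 ^ B * 2 ^ B := by
    have h5 : a / 2 ^ B * 2 ^ B + a % 2 ^ B = a := by
      rw [mul_comm]; exact Nat.div_add_mod a (2 ^ B)
    omega
  rw [h4]

-- reversing an enumeration = enumerating the reversed list with flipped indices
theorem pv_enum_reverse (l : List Int) (s : Int) :
    (PySem.List.enumerate l s).reverse
      = (PySem.List.enumerate l.reverse 0).map
          (fun p => (s + (l.length : Int) - 1 - p.1, p.2)) := by
  induction l generalizing s with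
  | nil => simp [PySem.List.enumerate_nil]
  | cons x xs ih =>
    rw [PySem.List.enumerate_cons, List.reverse_cons, List.reverse_cons,
      PySem.List.enumerate_append, ih (s + 1)]
    simp [PySem.List.enumerate_cons, PySem.List.enumerate_nil]
    constructor
    · intro a b _; omega
    · omega

theorem pv_rev_find (data : List Int) (default : Int) :
    ((PySem.List.enumerate data).reverse.find? (fun p => p.2 != default)).map Prod.fst
      = (((PySem.List.enumerate data.reverse).find? (fun p => p.2 != default)).map Prod.fst).map
          (fun j => (data.length : Int) - 1 - j) := by
  rw [pv_enum_reverse data 0, List.find?_map,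
    show ((fun p : Int × Int => p.2 != default) ∘
        (fun p : Int × Int => ((0:Int) + (data.length : Int) - 1 - p.1, p.2)))
      = (fun p : Int × Int => p.2 != default) from rfl]
  cases h : (PySem.List.enumerate data.reverse).find? (fun p => p.2 != default)
  · simp
  · simp

-- B's live list, read through head?/getLast?, is exactly what A's two scans find
theorem pv_live_head (data : List Int) (default : Int) :
    (((PySem.List.enumerate data).filter (fun p => p.2 != default)).map Prod.fst).head?
      = ((PySem.List.enumerate data).find? (fun p => p.2 != default)).map Prod.fst := by
  rw [List.head?_map, List.head?_filter]

theorem pv_live_getLast (data : List Int) (default : Int) :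
    (((PySem.List.enumerate data).filter (fun p => p.2 != default)).map Prod.fst).getLast?
      = ((PySem.List.enumerate data).reverse.find? (fun p => p.2 != default)).map Prod.fst := by
  rw [List.getLast?_eq_head?_reverse, ← List.map_reverse, List.head?_map,
    ← List.filter_reverse, List.head?_filter]

-- live is a strictly increasing list of nonnegative indices
theorem pv_live_sorted (data : List Int) (default : Int) :
    (((PySem.List.enumerate data).filter (fun p => p.2 != default)).map Prod.fst).Pairwise (· < ·) := by
  rw [List.pairwise_map]
  exact (PySem.List.pairwise_lt_enumerate data 0).filter _

theorem pv_live_nonneg (data : List Int) (default : Int) (x : Int)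
    (hx : x ∈ ((PySem.List.enumerate data).filter (fun p => p.2 != default)).map Prod.fst) :
    0 ≤ x := by
  obtain ⟨p, hp, rfl⟩ := List.mem_map.mp hx
  have hpm : p ∈ PySem.List.enumerate data 0 := List.mem_of_mem_filter hp
  obtain ⟨k, _, rfl⟩ := (PySem.List.mem_enumerate_iff data 0 p).mp hpm
  simp

-- head ≤ getLast for a nonempty strictly increasing list
theorem pv_head_le_getLast (f : Int) (rest : List Int)
    (h : (f :: rest).Pairwise (· < ·)) :
    f ≤ (f :: rest).getLast (List.cons_ne_nil f rest) := by
  cases rest with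
  | nil => simp
  | cons y ys =>
    have hmem : (y :: ys).getLast (List.cons_ne_nil y ys) ∈ y :: ys := List.getLast_mem _
    have hlt := (List.pairwise_cons.mp h).1 _ hmem
    rw [List.getLast_cons (List.cons_ne_nil y ys)]
    omega

-- reduction equations for the two ports
theorem pv_alt_nil (data : List Int) (default : Int)
    (hl : ((PySem.List.enumerate data).filter (fun p => p.2 != default)).map Prod.fst = []) :
    aligned_base_for_live_range_py_alt data default = 0 := by
  unfold aligned_base_for_live_range_py_alt
  rw [hl]

theorem pv_alt_cons (data : List Int) (default : Int) (f : Int) (rest : List Int)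
    (hl : ((PySem.List.enumerate data).filter (fun p => p.2 != default)).map Prod.fst = f :: rest) :
    aligned_base_for_live_range_py_alt data default
      = pvAlignLoop f ((f :: rest).getLast (List.cons_ne_nil f rest))
          (((f :: rest).getLast (List.cons_ne_nil f rest)).toNat + 1) 1 := by
  unfold aligned_base_for_live_range_py_alt
  rw [hl]

theorem pv_a_some (data : List Int) (default : Int) (first v : Int) (q : Int × Int)
    (hf : (PySem.List.enumerate data).find? (fun p => p.2 != default) = some (first, v))
    (hr : (PySem.List.enumerate data.reverse).find? (fun p => p.2 != default) = some q) :
    aligned_base_for_live_range_py data default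
      = (if PySem.Int.bxor first ((data.length : Int) - 1 - q.1) == 0 then first
         else PySem.Int.band first
           (Int.not (((1:Int) <<< PySem.Int.bitLength
              (PySem.Int.bxor first ((data.length : Int) - 1 - q.1))) - 1))) := by
  unfold aligned_base_for_live_range_py
  rw [hf, hr]
  rfl

-- ===== VERDICT PROOF =====
theorem aligned_base_for_live_range_py_spec : Claim_equal_aligned_base_for_live_range_py := by
  intro data default _
  show aligned_base_for_live_range_py data default = aligned_base_for_live_range_py_alt data default
  cases hf : (PySem.List.enumerate data).find? (fun p => p.2 != default) with
  | none =>
    have h0 := pv_live_head data default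
    rw [hf] at h0
    simp only [Option.map_none] at h0
    rw [pv_alt_nil data default (List.head?_eq_none_iff.mp h0)]
    unfold aligned_base_for_live_range_py
    rw [hf]
  | some p =>
    obtain ⟨first, v⟩ := p
    -- the live list is nonempty with head = first
    have hhead := pv_live_head data default
    rw [hf] at hhead
    cases hl : ((PySem.List.enumerate data).filter (fun p => p.2 != default)).map Prod.fst with
    | nil => rw [hl] at hhead; simp at hhead
    | cons f rest =>
      rw [hl] at hhead
      simp only [List.head?_cons, Option.map_some, Option.some_inj] at hhead
      -- the reversed scan finds something; its value encodes the getLast of live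
      have hgl := pv_live_getLast data default
      rw [pv_rev_find, hl] at hgl
      rw [List.getLast?_eq_some_getLast (List.cons_ne_nil f rest)] at hgl
      cases hr : (PySem.List.enumerate data.reverse).find? (fun p => p.2 != default) with
      | none => rw [hr] at hgl; simp at hgl
      | some q =>
        rw [hr] at hgl
        simp only [Option.map_some, Option.some_inj] at hgl
        rw [pv_a_some data default first v q hf hr, pv_alt_cons data default f rest hl,
          ← hgl, ← hhead]
        -- nonnegativity and ordering of the two boundary indices
        have hsorted := pv_live_sorted data default
        rw [hl] at hsorted
        have hfL : f ≤ (f :: rest).getLast (List.cons_ne_nil f rest) :=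
          pv_head_le_getLast f rest hsorted
        have hf0 : 0 ≤ f :=
          pv_live_nonneg data default f (by rw [hl]; exact List.mem_cons_self ..)
        have hL0 : 0 ≤ (f :: rest).getLast (List.cons_ne_nil f rest) :=
          pv_live_nonneg data default _ (by rw [hl]; exact List.getLast_mem _)
        -- switch to Nats
        obtain ⟨b, hb⟩ : ∃ b : Nat, (f :: rest).getLast (List.cons_ne_nil f rest) = (b : Int) :=
          ⟨((f :: rest).getLast (List.cons_ne_nil f rest)).toNat,
            (Int.toNat_of_nonneg hL0).symm⟩
        rw [hb]
        rw [hb] at hfL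
        obtain ⟨a, rfl⟩ : ∃ a : Nat, f = (a : Int) := ⟨f.toNat, (Int.toNat_of_nonneg hf0).symm⟩
        by_cases hab : a = b
        · subst hab
          rw [if_pos (by simp [PySem.Int.bxor_self])]
          rw [pv_loop_self]
        · have hxne : a ^^^ b ≠ 0 := fun h => hab (Nat.xor_eq_zero_iff.mp h)
          rw [PySem.Int.bxor_natCast]
          rw [if_neg (by simp only [beq_iff_eq, Int.natCast_eq_zero]; exact hxne)]
          rw [pv_band_not_mask]
          have hble : b < 2 ^ (b + 1) := by
            calc b < 2 ^ b := Nat.lt_two_pow_self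
            _ ≤ 2 ^ (b + 1) := Nat.pow_le_pow_right (by omega) (by omega)
          have hxlt : a ^^^ b < 2 ^ (b + 1) := by
            have hab' : a ≤ b := by exact_mod_cast hfL
            have haq : a / 2 ^ (b + 1) = b / 2 ^ (b + 1) := by
              rw [Nat.div_eq_of_lt (by omega), Nat.div_eq_of_lt hble]
            exact (pv_div_eq_iff_xor_lt (b + 1) a b).mp haq
          have hB := pv_bitLength_le (a ^^^ b) (b + 1) hxne hxlt
          have hone : ((1:Int)) = ((2 ^ 0 : Nat) : Int) := by norm_num
          have htn : (((b : Int)).toNat + 1) = b + 1 := by simp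
          rw [htn, hone]
          exact (pv_loop_run a b hab (b + 1) 0 (by omega) (by omega)).symm
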